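-- pv_equiv track=rewrite | github.com/hasanhasanhaji/Mehr_corpus | Preprocess/Nlp_Preprocess.py | head_string_match
-- ===== SOURCE A (Python) =====
-- def head_string_match(samples, preprocessed_file):
--         f_str_head = [j for j in preprocessed_file if int(samples[1]) <= int(j[0]) <= int(samples[2])
--                       and (j[10] == "N" or j[10] == "Ne")]
--         if len(f_str_head) > 0:
--             first_str = f_str_head[0][7]
--         else:
--             first_str = "f_null"
--
--         l_str_head = [i for i in preprocessed_file if int(samples[4]) <= int(i[0]) <= int(samples[5])
--                       and (i[10] == "N" or i[10] == "Ne")]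
--         if len(l_str_head) > 0:
--             last_str = l_str_head[0][7]
--         else:
--             last_str = "l_null"
--         if last_str == first_str:
--             return "1"
--         else:
--             return "0"
-- ===== SOURCE B (Python) =====
-- def head_string_match(samples, preprocessed_file):
--     # Reverse traversal with last-writer-wins overwriting: every matching row
--     # overwrites the accumulator, so after scanning right-to-left the LEFTMOST
--     # match remains -- no "first hit" guards or intermediate lists needed.
--     first = "f_null"
--     last = "l_null"
--     for row in reversed(preprocessed_file):
--         is_ne = row[10] == "N" or row[10] == "Ne"
--         if int(samples[1]) <= int(row[0]) <= int(samples[2]) and is_ne: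
--             first = row[7]
--         if int(samples[4]) <= int(row[0]) <= int(samples[5]) and is_ne:
--             last = row[7]
--     return "1" if first == last else "0"
-- ===== Notes on version B (the rewrite author's own statement) =====
-- stated objective: alternative
-- what changed: Replaces A's two forward filtering comprehensions (take head of each filtered list) by one reverse traversal with unconditional last-writer-wins overwriting of two plain string accumulators, so the leftmost match survives without any emptiness checks or intermediate lists.
import Mathlib
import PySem

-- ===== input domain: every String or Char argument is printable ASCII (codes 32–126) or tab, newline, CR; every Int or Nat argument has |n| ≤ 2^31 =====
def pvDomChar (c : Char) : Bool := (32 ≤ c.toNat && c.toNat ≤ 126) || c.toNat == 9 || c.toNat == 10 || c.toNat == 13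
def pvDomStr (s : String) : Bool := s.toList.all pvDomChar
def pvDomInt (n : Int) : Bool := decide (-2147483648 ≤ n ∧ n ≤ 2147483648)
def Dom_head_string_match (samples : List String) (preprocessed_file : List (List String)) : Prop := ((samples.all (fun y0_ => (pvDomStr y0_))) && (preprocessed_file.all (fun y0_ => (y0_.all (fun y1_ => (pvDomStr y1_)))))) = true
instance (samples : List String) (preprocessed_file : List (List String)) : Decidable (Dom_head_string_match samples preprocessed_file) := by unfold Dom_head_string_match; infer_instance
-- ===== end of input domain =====

-- B replaces A's two forward filtering comprehensions by one reverse traversal with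
-- last-writer-wins overwriting of two plain accumulators (objective: alternative, same O(n)).

-- shared primitive wrappers: xs[i] (defaulted; Pre_ keeps indices in range) and int(s) (defaulted; Pre_ keeps it parseable)
def pvGS (xs : List String) (i : Nat) : String := (PySem.List.pyGet? xs (i : Int)).getD ""
def pvI (s : String) : Int := (PySem.Int.ofStr? s).getD 0

-- ===== PORT A =====
-- the comprehension's condition, named: int(samples[lo]) <= int(j[0]) <= int(samples[hi]) and (j[10] == "N" or j[10] == "Ne")
def pvHit (samples : List String) (lo hi : Nat) (j : List String) : Bool :=
  (decide (pvI (pvGS samples lo) ≤ pvI (pvGS j 0)) && decide (pvI (pvGS j 0) ≤ pvI (pvGS samples hi)))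
    && (pvGS j 10 == "N" || pvGS j 10 == "Ne")

def head_string_match (samples : List String) (preprocessed_file : List (List String)) : String :=
  let f_str_head := preprocessed_file.filter (pvHit samples 1 2)
  let first_str := if 0 < f_str_head.length
    then pvGS ((PySem.List.pyGet? f_str_head (0 : Int)).getD []) 7 else "f_null"
  let l_str_head := preprocessed_file.filter (pvHit samples 4 5)
  let last_str := if 0 < l_str_head.length
    then pvGS ((PySem.List.pyGet? l_str_head (0 : Int)).getD []) 7 else "l_null"
  if last_str == first_str then "1" else "0"

-- ===== PORT B =====
-- B's loop body: overwrite the (first, last) string accumulators from one row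
def pvStep (samples : List String) (st : String × String) (row : List String) : String × String :=
  let n := pvI (pvGS row 0)
  let is_ne := pvGS row 10 == "N" || pvGS row 10 == "Ne"
  let f := if (decide (pvI (pvGS samples 1) ≤ n) && decide (n ≤ pvI (pvGS samples 2))) && is_ne
           then pvGS row 7 else st.1
  let l := if (decide (pvI (pvGS samples 4) ≤ n) && decide (n ≤ pvI (pvGS samples 5))) && is_ne
           then pvGS row 7 else st.2
  (f, l)

def head_string_match_alt (samples : List String) (preprocessed_file : List (List String)) : String :=
  let st := preprocessed_file.reverse.foldl (pvStep samples) ("f_null", "l_null")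
  if st.1 == st.2 then "1" else "0"

-- ===== PRECONDITION & SPEC =====
-- Pre_ is exactly where the Python A returns normally: for every row, the lazily-evaluated
-- pieces of A's comprehension conditions must not raise (samples[1]/samples[4] and row[0] parse as
-- ints; samples[2]/samples[5] parse when the left comparison holds; row has ≥ 11 fields when the
-- whole range test holds); it excludes only inputs where A raises ValueError or IndexError.
def Pre_head_string_match (samples : List String) (preprocessed_file : List (List String)) : Prop :=
  ∀ row ∈ preprocessed_file,
    (PySem.Int.ofStr? (pvGS samples 1)).isSome = true ∧
    (PySem.Int.ofStr? (pvGS row 0)).isSome = true ∧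
    (PySem.Int.ofStr? (pvGS samples 4)).isSome = true ∧
    (pvI (pvGS samples 1) ≤ pvI (pvGS row 0) →
      (PySem.Int.ofStr? (pvGS samples 2)).isSome = true ∧
      (pvI (pvGS row 0) ≤ pvI (pvGS samples 2) → 11 ≤ row.length)) ∧
    (pvI (pvGS samples 4) ≤ pvI (pvGS row 0) →
      (PySem.Int.ofStr? (pvGS samples 5)).isSome = true ∧
      (pvI (pvGS row 0) ≤ pvI (pvGS samples 5) → 11 ≤ row.length))
instance (samples : List String) (preprocessed_file : List (List String)) : Decidable (Pre_head_string_match samples preprocessed_file) := by unfold Pre_head_string_match; infer_instance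

def pvWitness_head_string_match : List String × List (List String) :=
  (["0", "0", "5", "0", "3", "9"], [["1", "", "", "", "", "", "", "tok", "", "", "N"]])

def Spec_head_string_match (samples : List String) (preprocessed_file : List (List String)) (out : String) : Prop := out = head_string_match_alt samples preprocessed_file
instance (samples : List String) (preprocessed_file : List (List String)) (out : String) : Decidable (Spec_head_string_match samples preprocessed_file out) := by unfold Spec_head_string_match; infer_instance

-- ===== CLAIM (what is proved, stated in full; the proofs are below) =====
def Claim_equal_head_string_match : Prop := ∀ (samples : List String) (preprocessed_file : List (List String)), Dom_head_string_match samples preprocessed_file → Pre_head_string_match samples preprocessed_file → Spec_head_string_match samples preprocessed_file (head_string_match samples preprocessed_file)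

-- ===== LEMMAS AND PROOFS =====

-- B's reverse fold (last writer wins) computes the head of each of A's filtered lists
lemma pvFold_eq (samples : List String) (pf : List (List String)) (f0 l0 : String) :
    pf.reverse.foldl (pvStep samples) (f0, l0) =
      (((pf.filter (pvHit samples 1 2)).head?.map (fun j => pvGS j 7)).getD f0,
       ((pf.filter (pvHit samples 4 5)).head?.map (fun j => pvGS j 7)).getD l0) := by
  rw [List.foldl_reverse]
  induction pf with
  | nil => simp
  | cons h t ih =>
    have hs : ∀ st : String × String, pvStep samples st h =
        ((if pvHit samples 1 2 h then pvGS h 7 else st.1),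
         (if pvHit samples 4 5 h then pvGS h 7 else st.2)) := by
      intro st; rfl
    rw [List.foldr_cons, ih, hs]
    cases hb1 : pvHit samples 1 2 h <;> cases hb2 : pvHit samples 4 5 h <;>
      simp [hb1, hb2]

-- ===== VERDICT (by name: the statement is the Claim_ definition above) =====

theorem head_string_match_spec : Claim_equal_head_string_match := by
  intro samples pf _ _
  unfold Spec_head_string_match head_string_match head_string_match_alt
  rw [pvFold_eq]
  have comp : ∀ (l : List (List String)) (d : String),
      (if 0 < l.length then pvGS ((PySem.List.pyGet? l (0 : Int)).getD []) 7 else d)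
        = (l.head?.map (fun j => pvGS j 7)).getD d := by
    intro l d
    cases l with
    | nil => simp
    | cons x xs => simp [PySem.List.pyGet?, PySem.List.pyIdx?]
  simp only [comp]
  set F := (((pf.filter (pvHit samples 1 2)).head?.map (fun j => pvGS j 7)).getD "f_null") with hF
  set L := (((pf.filter (pvHit samples 4 5)).head?.map (fun j => pvGS j 7)).getD "l_null") with hL
  by_cases h : F = L
  · simp [h]
  · have h' : ¬ L = F := fun e => h e.symm
    simp [beq_iff_eq, h, h']
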